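-- pv_equiv track=rewrite | github.com/LinkaSofia/BD_II_AT2_LOG | redo.py | encontrarCkpt
-- ===== SOURCE A (Python) =====
-- def encontrarCkpt(linhas):
--     start = 0
--     end = False
--     for i, linha in enumerate(linhas):
--         if 'Start CKPT' in linha:
--             start = i
--         if 'End CKPT' in linha:
--             end = True
--     return start, end
-- ===== SOURCE B (Python) =====
-- def encontrarCkpt(linhas):
--     end = any('End CKPT' in linha for linha in linhas)
--     start = 0
--     for i in range(len(linhas) - 1, -1, -1):
--         if 'Start CKPT' in linhas[i]:
--             start = i
--             break
--     return start, end
-- ===== Notes on version B (the rewrite author's own statement) =====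
-- stated objective: alternative
-- what changed: Replaces the single forward overwriting sweep with two independent passes: an any() existence check for 'End CKPT' plus a backward early-exit search for the last 'Start CKPT' (default 0).
import Mathlib
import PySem

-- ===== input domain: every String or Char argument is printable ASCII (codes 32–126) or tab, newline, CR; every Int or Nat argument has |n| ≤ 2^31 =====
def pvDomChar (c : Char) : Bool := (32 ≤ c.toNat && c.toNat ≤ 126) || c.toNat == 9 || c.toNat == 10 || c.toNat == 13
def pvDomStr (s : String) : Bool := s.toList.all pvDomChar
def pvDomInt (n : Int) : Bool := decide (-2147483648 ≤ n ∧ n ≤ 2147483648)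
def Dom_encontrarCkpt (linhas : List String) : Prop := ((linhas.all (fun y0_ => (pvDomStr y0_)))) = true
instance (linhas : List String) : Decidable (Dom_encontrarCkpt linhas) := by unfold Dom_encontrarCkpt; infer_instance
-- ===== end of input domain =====

-- B computes the two outputs in two independent passes (any-existence check for 'End CKPT',
-- backward early-exit search for the last 'Start CKPT') instead of A's single overwriting forward sweep.


-- ===== PORT A =====
-- for i, linha in enumerate(linhas): overwrite start on 'Start CKPT', latch end on 'End CKPT'
def encontrarCkpt (linhas : List String) : Int × Bool :=
  (PySem.List.enumerate linhas).foldl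
    (fun st p =>
      let st := if PySem.Str.isIn "Start CKPT" p.2 then (p.1, st.2) else st
      if PySem.Str.isIn "End CKPT" p.2 then (st.1, true) else st)
    (0, false)

-- ===== PORT B =====
-- the backward for-loop with break: scan the (index, line) pairs from the last to the first,
-- return the index of the first hit, default 0 (exact transcription of Source B's
-- 'for i in range(len(linhas)-1, -1, -1): … break' over linhas[i])
def encontrarCkptFindStart : List (Int × String) → Int
  | [] => 0
  | p :: rest => if PySem.Str.isIn "Start CKPT" p.2 then p.1 else encontrarCkptFindStart rest

def encontrarCkpt_alt (linhas : List String) : Int × Bool :=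
  (encontrarCkptFindStart (PySem.List.enumerate linhas).reverse,
   linhas.any (fun linha => PySem.Str.isIn "End CKPT" linha))

-- ===== PRECONDITION & SPEC =====
def Spec_encontrarCkpt (linhas : List String) (out : Int × Bool) : Prop := out = encontrarCkpt_alt linhas
instance (linhas : List String) (out : Int × Bool) : Decidable (Spec_encontrarCkpt linhas out) := by unfold Spec_encontrarCkpt; infer_instance

-- ===== CLAIM (what is proved, stated in full; the proofs are below) =====
def Claim_equal_encontrarCkpt : Prop := ∀ (linhas : List String), Dom_encontrarCkpt linhas → Spec_encontrarCkpt linhas (encontrarCkpt linhas)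

-- ===== LEMMAS AND PROOFS =====

-- first hit in a pair list under predicate cS, as an Option (proof-side characterisation)
def pvFind? (cS : String → Bool) : List (Int × String) → Option Int
  | [] => none
  | p :: rest => if cS p.2 then some p.1 else pvFind? cS rest

theorem pvFindStart_eq_getD (qs : List (Int × String)) :
    encontrarCkptFindStart qs = (pvFind? (fun s => PySem.Str.isIn "Start CKPT" s) qs).getD 0 := by
  induction qs with
  | nil => rfl
  | cons p rest ih =>
      simp only [encontrarCkptFindStart, pvFind?]
      split <;> simp_all

theorem pvFind?_append (cS : String → Bool) (xs ys : List (Int × String)) :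
    pvFind? cS (xs ++ ys) = (pvFind? cS xs).or (pvFind? cS ys) := by
  induction xs with
  | nil => simp [pvFind?]
  | cons p rest ih =>
      simp only [List.cons_append, pvFind?, ih]
      split <;> simp

-- the snd component of A's fold is the latch 'e0 || any hit'
theorem pvSnd_foldl (cS cE : String → Bool) (ps : List (Int × String)) (s0 : Int) (e0 : Bool) :
    ((ps.foldl
      (fun st p =>
        let st := if cS p.2 then (p.1, st.2) else st
        if cE p.2 then (st.1, true) else st)
      (s0, e0)).2)
    = (e0 || ps.any (fun p => cE p.2)) := by
  induction ps generalizing s0 e0 with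
  | nil => simp
  | cons p rest ih =>
      simp only [List.foldl_cons, List.any_cons]
      by_cases hS : cS p.2 <;> by_cases hE : cE p.2 <;>
        simp [hS, hE, ih]

-- the fst component of A's fold is the backward first-hit search with default s0
theorem pvFst_foldl (cS cE : String → Bool) (ps : List (Int × String)) (s0 : Int) (e0 : Bool) :
    ((ps.foldl
      (fun st p =>
        let st := if cS p.2 then (p.1, st.2) else st
        if cE p.2 then (st.1, true) else st)
      (s0, e0)).1)
    = (pvFind? cS ps.reverse).getD s0 := by
  induction ps generalizing s0 e0 with
  | nil => simp [pvFind?]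
  | cons p rest ih =>
      simp only [List.foldl_cons, List.reverse_cons, pvFind?_append]
      by_cases hS : cS p.2 <;> by_cases hE : cE p.2 <;>
        simp only [hS, hE, if_true, ih] <;>
          cases h : pvFind? cS rest.reverse <;> simp [pvFind?, hS]

theorem pvAny_enumerate (linhas : List String) (c : String → Bool) :
    (PySem.List.enumerate linhas).any (fun p => c p.2) = linhas.any c := by
  have h := PySem.List.map_snd_enumerate (xs := linhas) (s := 0)
  calc (PySem.List.enumerate linhas).any (fun p => c p.2)
      = ((PySem.List.enumerate linhas).map (·.2)).any c := by rw [List.any_map]; rfl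
    _ = linhas.any c := by rw [h]

-- ===== VERDICT (by name: the statement is the Claim_ definition above) =====
theorem encontrarCkpt_spec : Claim_equal_encontrarCkpt := by
  intro linhas _
  show _ = _
  unfold encontrarCkpt encontrarCkpt_alt
  refine Prod.ext ?_ ?_
  · rw [pvFst_foldl, pvFindStart_eq_getD]
  · rw [pvSnd_foldl, pvAny_enumerate, Bool.false_or]
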